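-- pv_equiv track=rewrite | github.com/anasstaha/2048GameAI | 2048IA/main.py | getNextGrid
-- ===== SOURCE A (Python) =====
-- UP = 100
--
-- LEFT = 101
--
-- DOWN = 102
--
-- RIGHT = 103
--
-- def swipeRow(row):
--     """swipes the tiles to the left in a row, sums identical tiles"""
--     temp = [0, 0, 0, 0]
--     prev = -1
--     i = 0
--     for element in row:
--         if element != 0:
--             if prev == -1:
--                 prev = element
--                 temp[i] = element
--                 i += 1
--             elif prev == element:
--                 temp[i - 1] = prev * 2
--                 prev = -1
--             else:
--                 prev = element
--                 temp[i] = element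
--                 i += 1
--     return temp
--
-- def getNextGrid(grid, move):
--     """guesses the next grid using a move (up, down, left, right)"""
--     temp = [0, 0, 0, 0,
--             0, 0, 0, 0,
--             0, 0, 0, 0,
--             0, 0, 0, 0]
--
--     if move == UP:
--         for i in range(4):
--             row = []
--             for j in range(4):
--                 row.append(grid[i + 4 * j])
--             row = swipeRow(row)
--             for j, val in enumerate(row):
--                 temp[i + 4 * j] = val
--
--     elif move == LEFT:
--         for i in range(4):
--             row = []
--             for j in range(4):
--                 row.append(grid[4 * i + j])
--             row = swipeRow(row)
--             for j, val in enumerate(row):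
--                 temp[4 * i + j] = val
--
--     elif move == DOWN:
--         for i in range(4):
--             row = []
--             for j in range(4):
--                 row.append(grid[i + 4 * (3 - j)])
--             row = swipeRow(row)
--             for j, val in enumerate(row):
--                 temp[i + 4 * (3 - j)] = val
--
--     elif move == RIGHT:
--         for i in range(4):
--             row = []
--             for j in range(4):
--                 row.append(grid[4 * i + 3 - j])
--             row = swipeRow(row)
--             for j, val in enumerate(row):
--                 temp[4 * i + 3 - j] = val
--
--     return temp
-- ===== SOURCE B (Python) =====
-- UP = 100
-- LEFT = 101
-- DOWN = 102
-- RIGHT = 103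
--
-- def _mergeLeft(row):
--     """compress a row (drop zeros), merge equal adjacent tiles once left-to-right, pad to 4 with zeros"""
--     xs = [x for x in row if x != 0]
--     out = []
--     i = 0
--     while i < len(xs):
--         if i + 1 < len(xs) and xs[i] == xs[i + 1]:
--             out.append(xs[i] * 2)
--             i += 2
--         else:
--             out.append(xs[i])
--             i += 1
--     return out + [0] * (4 - len(out))
--
-- def getNextGrid(grid, move):
--     """guesses the next grid using a move (up, down, left, right)"""
--     if move not in (UP, LEFT, DOWN, RIGHT):
--         return [0] * 16
--     rows = [[grid[4 * i + j] for j in range(4)] for i in range(4)]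
--     if move in (UP, DOWN):
--         rows = [list(col) for col in zip(*rows)]
--     if move in (DOWN, RIGHT):
--         rows = [row[::-1] for row in rows]
--     rows = [_mergeLeft(row) for row in rows]
--     if move in (DOWN, RIGHT):
--         rows = [row[::-1] for row in rows]
--     if move in (UP, DOWN):
--         rows = [list(col) for col in zip(*rows)]
--     return [v for row in rows for v in row]
-- ===== Notes on version B (the rewrite author's own statement) =====
-- stated objective: idiomatic
-- what changed: B reduces every move to one left-swipe per row by viewing the grid as a 4x4 matrix (transpose for UP/DOWN, reverse rows for DOWN/RIGHT), and swipes a row by compress-then-merge-adjacent-pairs instead of A's sentinel automaton with scattered index formulas per direction.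
-- intended difference: On grids where some line in the move's direction contains two adjacent -1 tiles after dropping zeros (move recognized, grid long enough), A returns them unmerged because its -1 'no pending tile' sentinel collides with the tile value, while B merges them to -2, the generic merge rule's intended value. — e.g. on getNextGrid([-1, -1, 0, 0, 0, 0, 0, 0, 0, 0, 0, 0, 0, 0, 0, 0], 101): A returns [-1, -1, 0, 0, 0, 0, 0, 0, 0, 0, 0, 0, 0, 0, 0, 0], B returns [-2, 0, 0, 0, 0, 0, 0, 0, 0, 0, 0, 0, 0, 0, 0, 0]
import Mathlib
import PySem

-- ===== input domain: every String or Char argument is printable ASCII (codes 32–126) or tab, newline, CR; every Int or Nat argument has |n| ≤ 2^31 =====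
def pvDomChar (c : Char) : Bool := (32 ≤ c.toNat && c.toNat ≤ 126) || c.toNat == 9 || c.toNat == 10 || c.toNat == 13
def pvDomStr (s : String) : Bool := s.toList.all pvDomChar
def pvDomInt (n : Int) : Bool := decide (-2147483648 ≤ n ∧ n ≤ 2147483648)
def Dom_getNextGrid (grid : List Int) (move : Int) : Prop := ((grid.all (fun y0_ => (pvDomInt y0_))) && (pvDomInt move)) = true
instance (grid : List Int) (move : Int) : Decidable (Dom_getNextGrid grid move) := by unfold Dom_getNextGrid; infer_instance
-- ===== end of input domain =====

-- B re-derives every move from one left-swipe per row (transpose/reverse the 4x4 matrix) with a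
-- compress-then-merge-pairs row swipe, instead of A's -1-sentinel automaton with per-direction index
-- formulas; equal return values outside D_ (A never mutates its argument, B does not either).

-- ===== PORT A =====
-- loop body of A's swipeRow ('temp[i] = …' is List.set; at the merge branch i ≥ 1 always holds, so
-- Nat subtraction in 'i - 1' is exact)
def stepA (st : List Int × Int × Nat) (element : Int) : List Int × Int × Nat :=
  if element ≠ 0 then
    if st.2.1 = -1 then (st.1.set st.2.2 element, element, st.2.2 + 1)
    else if st.2.1 = element then (st.1.set (st.2.2 - 1) (st.2.1 * 2), -1, st.2.2)
    else (st.1.set st.2.2 element, element, st.2.2 + 1)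
  else st

def swipeRow (row : List Int) : List Int :=
  (row.foldl stepA ([0, 0, 0, 0], -1, 0)).1

-- grid[k] for the in-range indices A uses; getD 0 only strips the option (inside Pre_ it is some _)
def fetchA (grid : List Int) (k : Nat) : Int :=
  (PySem.List.pyGet? grid (k : Int)).getD 0

def getNextGrid (grid : List Int) (move : Int) : List Int :=
  let temp : List Int := List.replicate 16 0
  if move = 100 then
    (List.range 4).foldl (fun temp i =>
      let row := (List.range 4).map (fun j => fetchA grid (i + 4 * j))
      let row := swipeRow row
      (PySem.List.enumerate row).foldl (fun t jv => t.set (i + 4 * jv.1.toNat) jv.2) temp) temp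
  else if move = 101 then
    (List.range 4).foldl (fun temp i =>
      let row := (List.range 4).map (fun j => fetchA grid (4 * i + j))
      let row := swipeRow row
      (PySem.List.enumerate row).foldl (fun t jv => t.set (4 * i + jv.1.toNat) jv.2) temp) temp
  else if move = 102 then
    (List.range 4).foldl (fun temp i =>
      let row := (List.range 4).map (fun j => fetchA grid (i + 4 * (3 - j)))
      let row := swipeRow row
      (PySem.List.enumerate row).foldl (fun t jv => t.set (i + 4 * (3 - jv.1.toNat)) jv.2) temp) temp
  else if move = 103 then
    (List.range 4).foldl (fun temp i =>
      let row := (List.range 4).map (fun j => fetchA grid (4 * i + 3 - j))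
      let row := swipeRow row
      (PySem.List.enumerate row).foldl (fun t jv => t.set (4 * i + 3 - jv.1.toNat) jv.2) temp) temp
  else temp

-- ===== PORT B =====

-- the while loop of Source B's _mergeLeft as structural recursion on the compressed list
def mergeRun : List Int → List Int
  | [] => []
  | [x] => [x]
  | x :: y :: rest => if x = y then x * 2 :: mergeRun rest else x :: mergeRun (y :: rest)

def mergeLeft (row : List Int) : List Int :=
  let out := mergeRun (row.filter (fun x => x ≠ 0))
  out ++ List.replicate (4 - out.length) 0

-- zip(*rows) on the 4x4 matrices B builds (all rows have length 4, so getD never defaults)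
def transpose4 (rs : List (List Int)) : List (List Int) :=
  (List.range 4).map (fun j => rs.map (fun r => r.getD j 0))

def rev4 (rs : List (List Int)) : List (List Int) := rs.map List.reverse

def getNextGrid_alt (grid : List Int) (move : Int) : List Int :=
  if move = 100 ∨ move = 101 ∨ move = 102 ∨ move = 103 then
    let rows := (List.range 4).map (fun i => (List.range 4).map (fun j =>
      (PySem.List.pyGet? grid ((4 * i + j : Nat) : Int)).getD 0))  -- grid[4*i+j]; some _ inside Pre_
    let rows := if move = 100 ∨ move = 102 then transpose4 rows else rows
    let rows := if move = 102 ∨ move = 103 then rev4 rows else rows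
    let rows := rows.map mergeLeft
    let rows := if move = 102 ∨ move = 103 then rev4 rows else rows
    let rows := if move = 100 ∨ move = 102 then transpose4 rows else rows
    rows.flatten
  else List.replicate 16 0

-- ===== PRECONDITION & SPEC =====
-- Pre_ excludes only inputs where A raises IndexError: a recognized move with fewer than 16 cells
def Pre_getNextGrid (grid : List Int) (move : Int) : Prop :=
  (move = 100 ∨ move = 101 ∨ move = 102 ∨ move = 103) → 16 ≤ grid.length

instance (grid : List Int) (move : Int) : Decidable (Pre_getNextGrid grid move) := by
  unfold Pre_getNextGrid; infer_instance

def pvWitness_getNextGrid : List Int × Int :=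
  ([2, 2, 0, 4, 0, 0, 0, 0, 4, 4, 2, 2, 0, 0, 0, 0], 101)

-- cells k and l lie on the same swipe line: same column for UP/DOWN, same row for LEFT/RIGHT
abbrev sameLine (move : Int) (k l : Nat) : Prop :=
  if move = 100 ∨ move = 102 then k % 4 = l % 4 else k / 4 = l / 4

-- On grids where some line in the move's direction contains two adjacent -1 tiles after dropping zeros
-- (move recognized, grid long enough), A returns them unmerged because its -1 'no pending tile'
-- sentinel collides with the tile value, while B merges them to -2, the generic merge rule's intended value.
def D_getNextGrid (grid : List Int) (move : Int) : Prop :=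
  (move = 100 ∨ move = 101 ∨ move = 102 ∨ move = 103) ∧ 16 ≤ grid.length ∧
  ∃ k < 16, ∃ l < 16, k < l ∧ sameLine move k l ∧
    grid.getD k 0 = -1 ∧ grid.getD l 0 = -1 ∧
    ∀ m < l, k < m → sameLine move k m → grid.getD m 0 = 0

instance (grid : List Int) (move : Int) : Decidable (D_getNextGrid grid move) := by
  unfold D_getNextGrid; infer_instance

def Spec_getNextGrid (grid : List Int) (move : Int) (out : List Int) : Prop :=
  ¬ D_getNextGrid grid move → out = getNextGrid_alt grid move

instance (grid : List Int) (move : Int) (out : List Int) : Decidable (Spec_getNextGrid grid move out) := by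
  unfold Spec_getNextGrid; infer_instance

def pvDiffWitness_getNextGrid : List Int × Int :=
  ([-1, -1, 0, 0, 0, 0, 0, 0, 0, 0, 0, 0, 0, 0, 0, 0], 101)

def pvDiffWitnessOut_getNextGrid : (List Int) × (List Int) :=
  ([-1, -1, 0, 0, 0, 0, 0, 0, 0, 0, 0, 0, 0, 0, 0, 0],
   [-2, 0, 0, 0, 0, 0, 0, 0, 0, 0, 0, 0, 0, 0, 0, 0])

-- ===== CLAIM (what is proved, stated in full; the proofs are below) =====
def Claim_unchanged_getNextGrid : Prop := ∀ (grid : List Int) (move : Int), Dom_getNextGrid grid move → Pre_getNextGrid grid move → Spec_getNextGrid grid move (getNextGrid grid move)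
def Claim_changed_getNextGrid : Prop := Dom_getNextGrid (pvDiffWitness_getNextGrid.1) (pvDiffWitness_getNextGrid.2) ∧ Pre_getNextGrid (pvDiffWitness_getNextGrid.1) (pvDiffWitness_getNextGrid.2) ∧ D_getNextGrid (pvDiffWitness_getNextGrid.1) (pvDiffWitness_getNextGrid.2) ∧ getNextGrid (pvDiffWitness_getNextGrid.1) (pvDiffWitness_getNextGrid.2) = pvDiffWitnessOut_getNextGrid.1 ∧ getNextGrid_alt (pvDiffWitness_getNextGrid.1) (pvDiffWitness_getNextGrid.2) = pvDiffWitnessOut_getNextGrid.2 ∧ pvDiffWitnessOut_getNextGrid.1 ≠ pvDiffWitnessOut_getNextGrid.2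
def Claim_exact_getNextGrid : Prop := ∀ (grid : List Int) (move : Int), Dom_getNextGrid grid move → Pre_getNextGrid grid move → D_getNextGrid grid move → getNextGrid grid move ≠ getNextGrid_alt grid move


-- ===== LEMMAS AND PROOFS =====

-- two -1 tiles adjacent after dropping zeros, among four line cells in order
def badLine (a b c d : Int) : Prop :=
  (a = -1 ∧ b = -1) ∨ (b = -1 ∧ c = -1) ∨ (c = -1 ∧ d = -1) ∨
  (a = -1 ∧ b = 0 ∧ c = -1) ∨ (b = -1 ∧ c = 0 ∧ d = -1) ∨
  (a = -1 ∧ b = 0 ∧ c = 0 ∧ d = -1)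

-- two adjacent -1 cells in a list (matches badLine after zero-compression)
def hasAdjNegOnes : List Int → Bool
  | x :: y :: rest => (decide (x = -1) && decide (y = -1)) || hasAdjNegOnes (y :: rest)
  | _ => false

-- A's automaton on the compressed list: like mergeRun, but a -1 tile is pushed without pairing
def mergeRunA : List Int → List Int
  | [] => []
  | [x] => [x]
  | x :: y :: rest =>
    if x = -1 then x :: mergeRunA (y :: rest)
    else if x = y then x * 2 :: mergeRunA rest
    else x :: mergeRunA (y :: rest)

theorem badLine_iff (a b c d : Int) :
    hasAdjNegOnes (([a, b, c, d]).filter (fun x => x ≠ 0)) = true ↔ badLine a b c d := by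
  by_cases ha : a = 0 <;> by_cases hb : b = 0 <;> by_cases hc : c = 0 <;> by_cases hd : d = 0 <;>
    simp_all [hasAdjNegOnes, badLine] <;> tauto

theorem badLine_symm (a b c d : Int) : badLine a b c d ↔ badLine d c b a := by
  unfold badLine; tauto

-- write a list of values into temp at consecutive positions i, i+1, ...
def writeSeq : List Int → List Int → Nat → List Int
  | [], temp, _ => temp
  | v :: l, temp, i => writeSeq l (temp.set i v) (i + 1)

theorem writeSeq_set_absorb (v : Int) (l : List Int) (temp : List Int) (i : Nat) (x : Int) :
    writeSeq (v :: l) (temp.set i x) i = writeSeq (v :: l) temp i := by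
  simp [writeSeq, List.set_set]

theorem hasAdj_tail (x : Int) (l : List Int) (h : hasAdjNegOnes (x :: l) = false) :
    hasAdjNegOnes l = false := by
  cases l with
  | nil => rfl
  | cons y r => simp [hasAdjNegOnes] at h ⊢; tauto

theorem mergeRunA_cons_neg (l : List Int) : mergeRunA (-1 :: l) = -1 :: mergeRunA l := by
  cases l <;> simp [mergeRunA]

theorem mergeRunA_cons_shape (x : Int) (l : List Int) : ∃ v l2, mergeRunA (x :: l) = v :: l2 := by
  cases l with
  | nil => exact ⟨x, [], rfl⟩
  | cons y r =>
    by_cases h1 : x = -1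
    · exact ⟨x, mergeRunA (y :: r), by simp [mergeRunA, h1]⟩
    · by_cases h2 : x = y
      · exact ⟨x * 2, mergeRunA r, by subst h2; simp [mergeRunA, h1]⟩
      · exact ⟨x, mergeRunA (y :: r), by simp [mergeRunA, h1, h2]⟩

theorem mergeRun_length_le (l : List Int) : (mergeRun l).length ≤ l.length := by
  fun_induction mergeRun l <;> simp_all <;> omega

theorem mergeRunA_length_le (l : List Int) : (mergeRunA l).length ≤ l.length := by
  fun_induction mergeRunA l <;> simp_all <;> omega

theorem mergeRunA_eq (l : List Int) (h : hasAdjNegOnes l = false) : mergeRunA l = mergeRun l := by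
  fun_induction mergeRunA l with
  | case1 => rfl
  | case2 => rfl
  | case3 y rest ih =>
    have hy : ¬((-1 : Int) = y) := by simp [hasAdjNegOnes] at h; tauto
    rw [mergeRun, if_neg hy, ih (hasAdj_tail _ _ h)]
  | case4 y rest hy ih =>
    rw [mergeRun, if_pos rfl, ih (hasAdj_tail _ _ (hasAdj_tail _ _ h))]
  | case5 x y rest hx hxy ih =>
    rw [mergeRun, if_neg hxy, ih (hasAdj_tail _ _ h)]

theorem mergeRunA_ne (l : List Int) (h : hasAdjNegOnes l = true) : mergeRunA l ≠ mergeRun l := by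
  fun_induction mergeRunA l with
  | case1 => simp [hasAdjNegOnes] at h
  | case2 => simp [hasAdjNegOnes] at h
  | case3 y rest ih =>
    by_cases hy : y = -1
    · subst hy
      rw [mergeRun, if_pos rfl]
      simp
    · have hne : ¬((-1 : Int) = y) := fun hh => hy hh.symm
      have htl : hasAdjNegOnes (y :: rest) = true := by
        simpa [hasAdjNegOnes, hy] using h
      rw [mergeRun, if_neg hne]
      simpa using ih htl
  | case4 y rest hy ih =>
    have h2 : hasAdjNegOnes (y :: rest) = true := by
      simpa [hasAdjNegOnes, hy] using h
    have htl : hasAdjNegOnes rest = true := by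
      cases rest with
      | nil => simp [hasAdjNegOnes] at h2
      | cons z r => simpa [hasAdjNegOnes, hy] using h2
    rw [mergeRun, if_pos rfl]
    simpa using ih htl
  | case5 x y rest hx hxy ih =>
    have htl : hasAdjNegOnes (y :: rest) = true := by
      simpa [hasAdjNegOnes, hx] using h
    rw [mergeRun, if_neg hxy]
    simpa using ih htl

theorem mergeRun_nonzero (l : List Int) (h : ∀ x ∈ l, x ≠ 0) : ∀ x ∈ mergeRun l, x ≠ 0 := by
  fun_induction mergeRun l with
  | case1 => simp
  | case2 x => simpa using h
  | case3 y rest ih =>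
    intro z hz
    rcases List.mem_cons.mp hz with rfl | hz
    · have := h y (by simp)
      omega
    · exact ih (fun w hw => h w (by simp [hw])) z hz
  | case4 x y rest hxy ih =>
    intro z hz
    rcases List.mem_cons.mp hz with rfl | hz
    · exact h z (by simp)
    · exact ih (fun w hw => h w (by simp [hw])) z hz

theorem mergeRunA_nonzero (l : List Int) (h : ∀ x ∈ l, x ≠ 0) : ∀ x ∈ mergeRunA l, x ≠ 0 := by
  fun_induction mergeRunA l with
  | case1 => simp
  | case2 x => simpa using h
  | case3 y rest ih =>
    intro z hz
    rcases List.mem_cons.mp hz with rfl | hz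
    · decide
    · exact ih (fun w hw => h w (by simp [hw])) z hz
  | case4 y rest hy ih =>
    intro z hz
    rcases List.mem_cons.mp hz with rfl | hz
    · have := h y (by simp)
      omega
    · exact ih (fun w hw => h w (by simp [hw])) z hz
  | case5 x y rest hx hxy ih =>
    intro z hz
    rcases List.mem_cons.mp hz with rfl | hz
    · exact h z (by simp)
    · exact ih (fun w hw => h w (by simp [hw])) z hz

theorem pad_inj (n : Nat) (l1 l2 : List Int) (h1 : ∀ x ∈ l1, x ≠ 0) (h2 : ∀ x ∈ l2, x ≠ 0)
    (he : l1 ++ List.replicate (n - l1.length) 0 = l2 ++ List.replicate (n - l2.length) 0) :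
    l1 = l2 := by
  induction l1 generalizing l2 n with
  | nil =>
    cases l2 with
    | nil => rfl
    | cons y r2 =>
      exfalso
      cases n with
      | zero => simp at he
      | succ m =>
        simp [List.replicate_succ] at he
        exact h2 y (by simp) he.1.symm
  | cons x r1 ih =>
    cases l2 with
    | nil =>
      exfalso
      cases n with
      | zero => simp at he
      | succ m =>
        simp [List.replicate_succ] at he
        exact h1 x (by simp) he.1
    | cons y r2 =>
      simp only [List.cons_append, List.cons.injEq] at he
      obtain ⟨hxy, ht⟩ := he
      have e1 : n - (x :: r1).length = (n - 1) - r1.length := by simp; omega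
      have e2 : n - (y :: r2).length = (n - 1) - r2.length := by simp; omega
      rw [e1] at ht
      rw [e2] at ht
      rw [hxy, ih (n - 1) r2 (fun w hw => h1 w (by simp [hw])) (fun w hw => h2 w (by simp [hw])) ht]

-- the swipeRow loop invariant, both pending states at once
theorem foldA_invariant (xs : List Int) :
    (∀ (temp : List Int) (i : Nat),
        (xs.foldl stepA (temp, -1, i)).1 = writeSeq (mergeRunA (xs.filter (fun x => x ≠ 0))) temp i)
    ∧ (∀ (p : Int) (temp : List Int) (i : Nat), p ≠ 0 → p ≠ -1 → 1 ≤ i →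
        temp.set (i - 1) p = temp →
        (xs.foldl stepA (temp, p, i)).1 =
          writeSeq (mergeRunA (p :: xs.filter (fun x => x ≠ 0))) temp (i - 1)) := by
  induction xs with
  | nil =>
    constructor
    · intro temp i; simp [writeSeq, mergeRunA]
    · intro p temp i hp0 hp1 hi ht
      simp [writeSeq, mergeRunA, ht]
  | cons x xs IH =>
    obtain ⟨IH1, IH2⟩ := IH
    constructor
    · intro temp i
      by_cases hx0 : x = 0
      · subst hx0
        have hfil : ((0:Int) :: xs).filter (fun x => x ≠ 0) = xs.filter (fun x => x ≠ 0) := by simp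
        rw [hfil]
        simpa [List.foldl_cons, stepA] using IH1 temp i
      · have hfil : (x :: xs).filter (fun x => x ≠ 0) = x :: xs.filter (fun x => x ≠ 0) := by
          simp [hx0]
        rw [hfil]
        by_cases hx1 : x = -1
        · subst hx1
          have hstep : List.foldl stepA (temp, -1, i) ((-1:Int) :: xs) =
              List.foldl stepA (temp.set i (-1), -1, i + 1) xs := by
            simp [List.foldl_cons, stepA]
          rw [hstep, IH1, mergeRunA_cons_neg]
          simp [writeSeq]
        · have hstep : List.foldl stepA (temp, -1, i) (x :: xs) =
              List.foldl stepA (temp.set i x, x, i + 1) xs := by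
            simp [List.foldl_cons, stepA, hx0, hx1]
          rw [hstep, IH2 x _ (i+1) hx0 hx1 (by omega) (by simp [List.set_set])]
          simp only [Nat.add_sub_cancel]
          obtain ⟨v, l2, hv⟩ := mergeRunA_cons_shape x (xs.filter (fun x => x ≠ 0))
          rw [hv, writeSeq_set_absorb]
    · intro p temp i hp0 hp1 hi ht
      by_cases hx0 : x = 0
      · subst hx0
        have hfil : ((0:Int) :: xs).filter (fun x => x ≠ 0) = xs.filter (fun x => x ≠ 0) := by simp
        rw [hfil]
        simpa [List.foldl_cons, stepA] using IH2 p temp i hp0 hp1 hi ht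
      · have hfil : (x :: xs).filter (fun x => x ≠ 0) = x :: xs.filter (fun x => x ≠ 0) := by
          simp [hx0]
        rw [hfil]
        by_cases hxp : p = x
        · have hx1 : x ≠ -1 := by rw [← hxp]; exact hp1
          have hstep : List.foldl stepA (temp, p, i) (x :: xs) =
              List.foldl stepA (temp.set (i - 1) (x * 2), -1, i) xs := by
            simp [List.foldl_cons, stepA, hx0, hp1, hxp, hx1]
          rw [hstep, IH1]
          have hmr : mergeRunA (p :: x :: xs.filter (fun x => x ≠ 0)) =
              x * 2 :: mergeRunA (xs.filter (fun x => x ≠ 0)) := by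
            simp [mergeRunA, hp1, hxp, hx1]
          rw [hmr]
          simp only [writeSeq]
          rw [Nat.sub_add_cancel hi]
        · by_cases hx1 : x = -1
          · subst hx1
            have hstep : List.foldl stepA (temp, p, i) ((-1:Int) :: xs) =
                List.foldl stepA (temp.set i (-1), -1, i + 1) xs := by
              simp [List.foldl_cons, stepA, hp1, hxp]
            rw [hstep, IH1]
            have hmr : mergeRunA (p :: -1 :: xs.filter (fun x => x ≠ 0)) =
                p :: mergeRunA (-1 :: xs.filter (fun x => x ≠ 0)) := by
              simp [mergeRunA, hp1, hxp]
            rw [hmr, mergeRunA_cons_neg]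
            simp only [writeSeq]
            rw [Nat.sub_add_cancel hi, ht]
          · have hstep : List.foldl stepA (temp, p, i) (x :: xs) =
                List.foldl stepA (temp.set i x, x, i + 1) xs := by
              simp [List.foldl_cons, stepA, hx0, hp1, hxp]
            rw [hstep, IH2 x _ (i+1) hx0 hx1 (by omega) (by simp [List.set_set])]
            simp only [Nat.add_sub_cancel]
            have hmr : mergeRunA (p :: x :: xs.filter (fun x => x ≠ 0)) =
                p :: mergeRunA (x :: xs.filter (fun x => x ≠ 0)) := by
              simp [mergeRunA, hp1, hxp]
            rw [hmr]
            simp only [writeSeq]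
            rw [Nat.sub_add_cancel hi, ht]
            obtain ⟨v, l2, hv⟩ := mergeRunA_cons_shape x (xs.filter (fun x => x ≠ 0))
            rw [hv, writeSeq_set_absorb]

theorem col_badLine_D (grid : List Int) (move : Int) (i : Nat) (hi : i < 4)
    (hlen : 16 ≤ grid.length) (hmv : move = 100 ∨ move = 102)
    (hb : badLine (grid.getD i 0) (grid.getD (i + 4) 0) (grid.getD (i + 8) 0)
      (grid.getD (i + 12) 0)) :
    D_getNextGrid grid move := by
  refine ⟨by tauto, hlen, ?_⟩
  have hsl : ∀ k l : Nat, k % 4 = l % 4 → sameLine move k l := by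
    intro k l h; unfold sameLine; rwa [if_pos hmv]
  have hsl' : ∀ k l : Nat, sameLine move k l → k % 4 = l % 4 := by
    intro k l h; unfold sameLine at h; rwa [if_pos hmv] at h
  rcases hb with ⟨h1, h2⟩ | ⟨h1, h2⟩ | ⟨h1, h2⟩ | ⟨h1, h2, h3⟩ | ⟨h1, h2, h3⟩ | ⟨h1, h2, h3, h4⟩
  · exact ⟨i, by omega, i + 4, by omega, by omega, hsl _ _ (by omega), h1, h2,
      fun m _ hm2 hm3 => absurd (hsl' _ _ hm3) (by omega)⟩
  · exact ⟨i + 4, by omega, i + 8, by omega, by omega, hsl _ _ (by omega), h1, h2,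
      fun m _ hm2 hm3 => absurd (hsl' _ _ hm3) (by omega)⟩
  · exact ⟨i + 8, by omega, i + 12, by omega, by omega, hsl _ _ (by omega), h1, h2,
      fun m _ hm2 hm3 => absurd (hsl' _ _ hm3) (by omega)⟩
  · refine ⟨i, by omega, i + 8, by omega, by omega, hsl _ _ (by omega), h1, h3, ?_⟩
    intro m hm1 hm2 hm3
    have := hsl' _ _ hm3
    have hm : m = i + 4 := by omega
    rw [hm]; exact h2
  · refine ⟨i + 4, by omega, i + 12, by omega, by omega, hsl _ _ (by omega), h1, h3, ?_⟩
    intro m hm1 hm2 hm3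
    have := hsl' _ _ hm3
    have hm : m = i + 8 := by omega
    rw [hm]; exact h2
  · refine ⟨i, by omega, i + 12, by omega, by omega, hsl _ _ (by omega), h1, h4, ?_⟩
    intro m hm1 hm2 hm3
    have := hsl' _ _ hm3
    have hm : m = i + 4 ∨ m = i + 8 := by omega
    rcases hm with hm | hm <;> rw [hm]
    · exact h2
    · exact h3

theorem row_badLine_D (grid : List Int) (move : Int) (i : Nat) (hi : i < 4)
    (hlen : 16 ≤ grid.length) (hmv : ¬(move = 100 ∨ move = 102))
    (hmv' : move = 101 ∨ move = 103)
    (hb : badLine (grid.getD (4 * i) 0) (grid.getD (4 * i + 1) 0) (grid.getD (4 * i + 2) 0)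
      (grid.getD (4 * i + 3) 0)) :
    D_getNextGrid grid move := by
  refine ⟨by tauto, hlen, ?_⟩
  have hsl : ∀ k l : Nat, k / 4 = l / 4 → sameLine move k l := by
    intro k l h; unfold sameLine; rwa [if_neg hmv]
  have hsl' : ∀ k l : Nat, sameLine move k l → k / 4 = l / 4 := by
    intro k l h; unfold sameLine at h; rwa [if_neg hmv] at h
  rcases hb with ⟨h1, h2⟩ | ⟨h1, h2⟩ | ⟨h1, h2⟩ | ⟨h1, h2, h3⟩ | ⟨h1, h2, h3⟩ | ⟨h1, h2, h3, h4⟩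
  · exact ⟨4 * i, by omega, 4 * i + 1, by omega, by omega, hsl _ _ (by omega), h1, h2,
      fun m _ hm2 hm3 => by omega⟩
  · exact ⟨4 * i + 1, by omega, 4 * i + 2, by omega, by omega, hsl _ _ (by omega), h1, h2,
      fun m _ hm2 hm3 => by omega⟩
  · exact ⟨4 * i + 2, by omega, 4 * i + 3, by omega, by omega, hsl _ _ (by omega), h1, h2,
      fun m _ hm2 hm3 => by omega⟩
  · refine ⟨4 * i, by omega, 4 * i + 2, by omega, by omega, hsl _ _ (by omega), h1, h3, ?_⟩
    intro m hm1 hm2 hm3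
    have hm : m = 4 * i + 1 := by omega
    rw [hm]; exact h2
  · refine ⟨4 * i + 1, by omega, 4 * i + 3, by omega, by omega, hsl _ _ (by omega), h1, h3, ?_⟩
    intro m hm1 hm2 hm3
    have hm : m = 4 * i + 2 := by omega
    rw [hm]; exact h2
  · refine ⟨4 * i, by omega, 4 * i + 3, by omega, by omega, hsl _ _ (by omega), h1, h4, ?_⟩
    intro m hm1 hm2 hm3
    have hm : m = 4 * i + 1 ∨ m = 4 * i + 2 := by omega
    rcases hm with hm | hm <;> rw [hm]
    · exact h2
    · exact h3

-- two adjacent -1 cells in a list (matches badLine after zero-compression)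

theorem fetchA_eq (grid : List Int) (k : Nat) : fetchA grid k = grid.getD k 0 := by
  simp [fetchA, List.getD]

theorem pyGet_getD_nat (xs : List Int) (k : Nat) :
    (PySem.List.pyGet? xs (k : Int)).getD 0 = xs.getD k 0 := by
  simp [List.getD]

theorem list_len4 (l : List Int) (h : l.length = 4) : ∃ a b c d : Int, l = [a, b, c, d] := by
  match l, h with
  | [a, b, c, d], _ => exact ⟨a, b, c, d, rfl⟩

theorem writeSeq_four (l : List Int) (h : l.length ≤ 4) :
    writeSeq l [0, 0, 0, 0] 0 = l ++ List.replicate (4 - l.length) 0 := by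
  match l, h with
  | [], _ => rfl
  | [a], _ => rfl
  | [a, b], _ => rfl
  | [a, b, c], _ => rfl
  | [a, b, c, d], _ => rfl

theorem swipeRow_pad (r : List Int) (hr : r.length = 4) :
    swipeRow r = mergeRunA (r.filter (fun x => x ≠ 0)) ++
      List.replicate (4 - (mergeRunA (r.filter (fun x => x ≠ 0))).length) 0 := by
  have hlen : (mergeRunA (r.filter (fun x => x ≠ 0))).length ≤ 4 := by
    have := mergeRunA_length_le (r.filter (fun x => x ≠ 0))
    have := List.length_filter_le (fun x => decide (x ≠ 0)) r
    omega
  unfold swipeRow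
  rw [(foldA_invariant r).1 [0, 0, 0, 0] 0, writeSeq_four _ hlen]

theorem swipe_eq_merge (r : List Int) (hr : r.length = 4)
    (h : hasAdjNegOnes (r.filter (fun x => x ≠ 0)) = false) :
    swipeRow r = mergeLeft r := by
  rw [swipeRow_pad r hr, mergeRunA_eq _ h]
  rfl

theorem filter_nonzero (r : List Int) : ∀ x ∈ r.filter (fun x => x ≠ 0), x ≠ 0 := by
  intro x hx
  simpa using (List.mem_filter.mp hx).2

theorem swipe_ne_merge (r : List Int) (hr : r.length = 4)
    (h : hasAdjNegOnes (r.filter (fun x => x ≠ 0)) = true) :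
    swipeRow r ≠ mergeLeft r := by
  intro he
  rw [swipeRow_pad r hr] at he
  exact mergeRunA_ne _ h (pad_inj 4 _ _
    (mergeRunA_nonzero _ (filter_nonzero r)) (mergeRun_nonzero _ (filter_nonzero r)) he)

theorem swipeRow_length (r : List Int) (hr : r.length = 4) : (swipeRow r).length = 4 := by
  have h1 := mergeRunA_length_le (r.filter (fun x => x ≠ 0))
  have h2 := List.length_filter_le (fun x => decide (x ≠ 0)) r
  rw [swipeRow_pad r hr, List.length_append, List.length_replicate]
  omega

theorem col_D_badLine (grid : List Int) (k l : Nat) (hl16 : l < 16) (hkl : k < l)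
    (hm : k % 4 = l % 4) (h1 : grid.getD k 0 = -1) (h2 : grid.getD l 0 = -1)
    (hz : ∀ m, m < l → k < m → k % 4 = m % 4 → grid.getD m 0 = 0) :
    ∃ i, i < 4 ∧ badLine (grid.getD i 0) (grid.getD (i + 4) 0) (grid.getD (i + 8) 0)
      (grid.getD (i + 12) 0) := by
  refine ⟨k % 4, by omega, ?_⟩
  have hcase : (k = k % 4 ∧ l = k % 4 + 4) ∨ (k = k % 4 ∧ l = k % 4 + 8) ∨
      (k = k % 4 ∧ l = k % 4 + 12) ∨ (k = k % 4 + 4 ∧ l = k % 4 + 8) ∨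
      (k = k % 4 + 4 ∧ l = k % 4 + 12) ∨ (k = k % 4 + 8 ∧ l = k % 4 + 12) := by omega
  rcases hcase with ⟨e1, e2⟩ | ⟨e1, e2⟩ | ⟨e1, e2⟩ | ⟨e1, e2⟩ | ⟨e1, e2⟩ | ⟨e1, e2⟩ <;>
      rw [e1] at h1 <;> rw [e2] at h2
  · exact Or.inl ⟨h1, h2⟩
  · exact Or.inr (Or.inr (Or.inr (Or.inl ⟨h1, hz (k % 4 + 4) (by omega) (by omega) (by omega), h2⟩)))
  · exact Or.inr (Or.inr (Or.inr (Or.inr (Or.inr ⟨h1, hz (k % 4 + 4) (by omega) (by omega) (by omega),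
      hz (k % 4 + 8) (by omega) (by omega) (by omega), h2⟩))))
  · exact Or.inr (Or.inl ⟨h1, h2⟩)
  · exact Or.inr (Or.inr (Or.inr (Or.inr (Or.inl ⟨h1, hz (k % 4 + 8) (by omega) (by omega) (by omega), h2⟩))))
  · exact Or.inr (Or.inr (Or.inl ⟨h1, h2⟩))

theorem row_D_badLine (grid : List Int) (k l : Nat) (hl16 : l < 16) (hkl : k < l)
    (hm : k / 4 = l / 4) (h1 : grid.getD k 0 = -1) (h2 : grid.getD l 0 = -1)
    (hz : ∀ m, m < l → k < m → k / 4 = m / 4 → grid.getD m 0 = 0) :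
    ∃ i, i < 4 ∧ badLine (grid.getD (4 * i) 0) (grid.getD (4 * i + 1) 0) (grid.getD (4 * i + 2) 0)
      (grid.getD (4 * i + 3) 0) := by
  refine ⟨k / 4, by omega, ?_⟩
  have hcase : (k = 4 * (k / 4) ∧ l = 4 * (k / 4) + 1) ∨ (k = 4 * (k / 4) ∧ l = 4 * (k / 4) + 2) ∨
      (k = 4 * (k / 4) ∧ l = 4 * (k / 4) + 3) ∨ (k = 4 * (k / 4) + 1 ∧ l = 4 * (k / 4) + 2) ∨
      (k = 4 * (k / 4) + 1 ∧ l = 4 * (k / 4) + 3) ∨ (k = 4 * (k / 4) + 2 ∧ l = 4 * (k / 4) + 3) := by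
    omega
  rcases hcase with ⟨e1, e2⟩ | ⟨e1, e2⟩ | ⟨e1, e2⟩ | ⟨e1, e2⟩ | ⟨e1, e2⟩ | ⟨e1, e2⟩ <;>
      rw [e1] at h1 <;> rw [e2] at h2
  · exact Or.inl ⟨h1, h2⟩
  · exact Or.inr (Or.inr (Or.inr (Or.inl ⟨h1, hz (4 * (k / 4) + 1) (by omega) (by omega) (by omega), h2⟩)))
  · exact Or.inr (Or.inr (Or.inr (Or.inr (Or.inr ⟨h1, hz (4 * (k / 4) + 1) (by omega) (by omega) (by omega),
      hz (4 * (k / 4) + 2) (by omega) (by omega) (by omega), h2⟩))))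
  · exact Or.inr (Or.inl ⟨h1, h2⟩)
  · exact Or.inr (Or.inr (Or.inr (Or.inr (Or.inl ⟨h1, hz (4 * (k / 4) + 2) (by omega) (by omega) (by omega), h2⟩))))
  · exact Or.inr (Or.inr (Or.inl ⟨h1, h2⟩))

theorem mergeLeft_length (r : List Int) (hr : r.length = 4) : (mergeLeft r).length = 4 := by
  have h1 := mergeRun_length_le (r.filter (fun x => x ≠ 0))
  have h2 := List.length_filter_le (fun x => decide (x ≠ 0)) r
  simp only [mergeLeft, List.length_append, List.length_replicate]
  omega

theorem exists_mergeLeft4 (r : List Int) (hr : r.length = 4) :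
    ∃ a b c d : Int, mergeLeft r = [a, b, c, d] :=
  list_len4 _ (mergeLeft_length r hr)

-- ===== VERDICT (by name: the statement is the Claim_ definition above) =====
set_option maxHeartbeats 2000000 in
theorem getNextGrid_spec : Claim_unchanged_getNextGrid := by
  intro grid move _hdom hpre hnd
  have hr4 : List.range 4 = [0, 1, 2, 3] := rfl
  by_cases hm : move = 100 ∨ move = 101 ∨ move = 102 ∨ move = 103
  · have hlen : 16 ≤ grid.length := hpre hm
    rcases grid with _ | ⟨g0, grid⟩; · simp at hlen
    rcases grid with _ | ⟨g1, grid⟩; · simp at hlen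
    rcases grid with _ | ⟨g2, grid⟩; · simp at hlen
    rcases grid with _ | ⟨g3, grid⟩; · simp at hlen
    rcases grid with _ | ⟨g4, grid⟩; · simp at hlen
    rcases grid with _ | ⟨g5, grid⟩; · simp at hlen
    rcases grid with _ | ⟨g6, grid⟩; · simp at hlen
    rcases grid with _ | ⟨g7, grid⟩; · simp at hlen
    rcases grid with _ | ⟨g8, grid⟩; · simp at hlen
    rcases grid with _ | ⟨g9, grid⟩; · simp at hlen
    rcases grid with _ | ⟨g10, grid⟩; · simp at hlen
    rcases grid with _ | ⟨g11, grid⟩; · simp at hlen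
    rcases grid with _ | ⟨g12, grid⟩; · simp at hlen
    rcases grid with _ | ⟨g13, grid⟩; · simp at hlen
    rcases grid with _ | ⟨g14, grid⟩; · simp at hlen
    rcases grid with _ | ⟨g15, grid⟩; · simp at hlen
    rcases hm with hm | hm | hm | hm <;> subst hm
    · -- move = 100
      have hnb0 : ¬ badLine g0 g4 g8 g12 :=
        fun hb => hnd (col_badLine_D _ _ 0 (by norm_num) (by simp) (by norm_num) hb)
      have h0 : hasAdjNegOnes (([g0, g4, g8, g12] : List Int).filter (fun x => x ≠ 0)) = false := by
        simpa using mt (badLine_iff _ _ _ _).mp hnb0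
      obtain ⟨w00, w01, w02, w03, hm0⟩ := exists_mergeLeft4 ([g0, g4, g8, g12] : List Int) rfl
      have hs0 : swipeRow ([g0, g4, g8, g12] : List Int) = [w00, w01, w02, w03] :=
        (swipe_eq_merge _ rfl h0).trans hm0
      have hnb1 : ¬ badLine g1 g5 g9 g13 :=
        fun hb => hnd (col_badLine_D _ _ 1 (by norm_num) (by simp) (by norm_num) hb)
      have h1 : hasAdjNegOnes (([g1, g5, g9, g13] : List Int).filter (fun x => x ≠ 0)) = false := by
        simpa using mt (badLine_iff _ _ _ _).mp hnb1
      obtain ⟨w10, w11, w12, w13, hm1⟩ := exists_mergeLeft4 ([g1, g5, g9, g13] : List Int) rfl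
      have hs1 : swipeRow ([g1, g5, g9, g13] : List Int) = [w10, w11, w12, w13] :=
        (swipe_eq_merge _ rfl h1).trans hm1
      have hnb2 : ¬ badLine g2 g6 g10 g14 :=
        fun hb => hnd (col_badLine_D _ _ 2 (by norm_num) (by simp) (by norm_num) hb)
      have h2 : hasAdjNegOnes (([g2, g6, g10, g14] : List Int).filter (fun x => x ≠ 0)) = false := by
        simpa using mt (badLine_iff _ _ _ _).mp hnb2
      obtain ⟨w20, w21, w22, w23, hm2⟩ := exists_mergeLeft4 ([g2, g6, g10, g14] : List Int) rfl
      have hs2 : swipeRow ([g2, g6, g10, g14] : List Int) = [w20, w21, w22, w23] :=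
        (swipe_eq_merge _ rfl h2).trans hm2
      have hnb3 : ¬ badLine g3 g7 g11 g15 :=
        fun hb => hnd (col_badLine_D _ _ 3 (by norm_num) (by simp) (by norm_num) hb)
      have h3 : hasAdjNegOnes (([g3, g7, g11, g15] : List Int).filter (fun x => x ≠ 0)) = false := by
        simpa using mt (badLine_iff _ _ _ _).mp hnb3
      obtain ⟨w30, w31, w32, w33, hm3⟩ := exists_mergeLeft4 ([g3, g7, g11, g15] : List Int) rfl
      have hs3 : swipeRow ([g3, g7, g11, g15] : List Int) = [w30, w31, w32, w33] :=
        (swipe_eq_merge _ rfl h3).trans hm3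
      simp only [getNextGrid, getNextGrid_alt, fetchA_eq, pyGet_getD_nat, hr4, transpose4, rev4, List.map_cons,
        List.map_nil, List.foldl_cons, List.foldl_nil, List.getD]
      norm_num
      rw [hs0, hs1, hs2, hs3, hm0, hm1, hm2, hm3]
      rfl
    · -- move = 101
      have hnb0 : ¬ badLine g0 g1 g2 g3 :=
        fun hb => hnd (row_badLine_D _ _ 0 (by norm_num) (by simp) (by norm_num) (by norm_num) hb)
      have h0 : hasAdjNegOnes (([g0, g1, g2, g3] : List Int).filter (fun x => x ≠ 0)) = false := by
        simpa using mt (badLine_iff _ _ _ _).mp hnb0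
      obtain ⟨w00, w01, w02, w03, hm0⟩ := exists_mergeLeft4 ([g0, g1, g2, g3] : List Int) rfl
      have hs0 : swipeRow ([g0, g1, g2, g3] : List Int) = [w00, w01, w02, w03] :=
        (swipe_eq_merge _ rfl h0).trans hm0
      have hnb1 : ¬ badLine g4 g5 g6 g7 :=
        fun hb => hnd (row_badLine_D _ _ 1 (by norm_num) (by simp) (by norm_num) (by norm_num) hb)
      have h1 : hasAdjNegOnes (([g4, g5, g6, g7] : List Int).filter (fun x => x ≠ 0)) = false := by
        simpa using mt (badLine_iff _ _ _ _).mp hnb1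
      obtain ⟨w10, w11, w12, w13, hm1⟩ := exists_mergeLeft4 ([g4, g5, g6, g7] : List Int) rfl
      have hs1 : swipeRow ([g4, g5, g6, g7] : List Int) = [w10, w11, w12, w13] :=
        (swipe_eq_merge _ rfl h1).trans hm1
      have hnb2 : ¬ badLine g8 g9 g10 g11 :=
        fun hb => hnd (row_badLine_D _ _ 2 (by norm_num) (by simp) (by norm_num) (by norm_num) hb)
      have h2 : hasAdjNegOnes (([g8, g9, g10, g11] : List Int).filter (fun x => x ≠ 0)) = false := by
        simpa using mt (badLine_iff _ _ _ _).mp hnb2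
      obtain ⟨w20, w21, w22, w23, hm2⟩ := exists_mergeLeft4 ([g8, g9, g10, g11] : List Int) rfl
      have hs2 : swipeRow ([g8, g9, g10, g11] : List Int) = [w20, w21, w22, w23] :=
        (swipe_eq_merge _ rfl h2).trans hm2
      have hnb3 : ¬ badLine g12 g13 g14 g15 :=
        fun hb => hnd (row_badLine_D _ _ 3 (by norm_num) (by simp) (by norm_num) (by norm_num) hb)
      have h3 : hasAdjNegOnes (([g12, g13, g14, g15] : List Int).filter (fun x => x ≠ 0)) = false := by
        simpa using mt (badLine_iff _ _ _ _).mp hnb3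
      obtain ⟨w30, w31, w32, w33, hm3⟩ := exists_mergeLeft4 ([g12, g13, g14, g15] : List Int) rfl
      have hs3 : swipeRow ([g12, g13, g14, g15] : List Int) = [w30, w31, w32, w33] :=
        (swipe_eq_merge _ rfl h3).trans hm3
      simp only [getNextGrid, getNextGrid_alt, fetchA_eq, pyGet_getD_nat, hr4, transpose4, rev4, List.map_cons,
        List.map_nil, List.foldl_cons, List.foldl_nil, List.getD]
      norm_num
      rw [hs0, hs1, hs2, hs3, hm0, hm1, hm2, hm3]
      rfl
    · -- move = 102
      have hnb0 : ¬ badLine g0 g4 g8 g12 :=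
        fun hb => hnd (col_badLine_D _ _ 0 (by norm_num) (by simp) (by norm_num) hb)
      have h0 : hasAdjNegOnes (([g12, g8, g4, g0] : List Int).filter (fun x => x ≠ 0)) = false := by
        simpa using mt (fun hb => (badLine_symm _ _ _ _).mp ((badLine_iff _ _ _ _).mp hb)) hnb0
      obtain ⟨w00, w01, w02, w03, hm0⟩ := exists_mergeLeft4 ([g12, g8, g4, g0] : List Int) rfl
      have hs0 : swipeRow ([g12, g8, g4, g0] : List Int) = [w00, w01, w02, w03] :=
        (swipe_eq_merge _ rfl h0).trans hm0
      have hnb1 : ¬ badLine g1 g5 g9 g13 :=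
        fun hb => hnd (col_badLine_D _ _ 1 (by norm_num) (by simp) (by norm_num) hb)
      have h1 : hasAdjNegOnes (([g13, g9, g5, g1] : List Int).filter (fun x => x ≠ 0)) = false := by
        simpa using mt (fun hb => (badLine_symm _ _ _ _).mp ((badLine_iff _ _ _ _).mp hb)) hnb1
      obtain ⟨w10, w11, w12, w13, hm1⟩ := exists_mergeLeft4 ([g13, g9, g5, g1] : List Int) rfl
      have hs1 : swipeRow ([g13, g9, g5, g1] : List Int) = [w10, w11, w12, w13] :=
        (swipe_eq_merge _ rfl h1).trans hm1
      have hnb2 : ¬ badLine g2 g6 g10 g14 :=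
        fun hb => hnd (col_badLine_D _ _ 2 (by norm_num) (by simp) (by norm_num) hb)
      have h2 : hasAdjNegOnes (([g14, g10, g6, g2] : List Int).filter (fun x => x ≠ 0)) = false := by
        simpa using mt (fun hb => (badLine_symm _ _ _ _).mp ((badLine_iff _ _ _ _).mp hb)) hnb2
      obtain ⟨w20, w21, w22, w23, hm2⟩ := exists_mergeLeft4 ([g14, g10, g6, g2] : List Int) rfl
      have hs2 : swipeRow ([g14, g10, g6, g2] : List Int) = [w20, w21, w22, w23] :=
        (swipe_eq_merge _ rfl h2).trans hm2
      have hnb3 : ¬ badLine g3 g7 g11 g15 :=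
        fun hb => hnd (col_badLine_D _ _ 3 (by norm_num) (by simp) (by norm_num) hb)
      have h3 : hasAdjNegOnes (([g15, g11, g7, g3] : List Int).filter (fun x => x ≠ 0)) = false := by
        simpa using mt (fun hb => (badLine_symm _ _ _ _).mp ((badLine_iff _ _ _ _).mp hb)) hnb3
      obtain ⟨w30, w31, w32, w33, hm3⟩ := exists_mergeLeft4 ([g15, g11, g7, g3] : List Int) rfl
      have hs3 : swipeRow ([g15, g11, g7, g3] : List Int) = [w30, w31, w32, w33] :=
        (swipe_eq_merge _ rfl h3).trans hm3
      simp only [getNextGrid, getNextGrid_alt, fetchA_eq, pyGet_getD_nat, hr4, transpose4, rev4, List.map_cons,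
        List.map_nil, List.foldl_cons, List.foldl_nil, List.getD]
      norm_num
      rw [hs0, hs1, hs2, hs3, hm0, hm1, hm2, hm3]
      rfl
    · -- move = 103
      have hnb0 : ¬ badLine g0 g1 g2 g3 :=
        fun hb => hnd (row_badLine_D _ _ 0 (by norm_num) (by simp) (by norm_num) (by norm_num) hb)
      have h0 : hasAdjNegOnes (([g3, g2, g1, g0] : List Int).filter (fun x => x ≠ 0)) = false := by
        simpa using mt (fun hb => (badLine_symm _ _ _ _).mp ((badLine_iff _ _ _ _).mp hb)) hnb0
      obtain ⟨w00, w01, w02, w03, hm0⟩ := exists_mergeLeft4 ([g3, g2, g1, g0] : List Int) rfl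
      have hs0 : swipeRow ([g3, g2, g1, g0] : List Int) = [w00, w01, w02, w03] :=
        (swipe_eq_merge _ rfl h0).trans hm0
      have hnb1 : ¬ badLine g4 g5 g6 g7 :=
        fun hb => hnd (row_badLine_D _ _ 1 (by norm_num) (by simp) (by norm_num) (by norm_num) hb)
      have h1 : hasAdjNegOnes (([g7, g6, g5, g4] : List Int).filter (fun x => x ≠ 0)) = false := by
        simpa using mt (fun hb => (badLine_symm _ _ _ _).mp ((badLine_iff _ _ _ _).mp hb)) hnb1
      obtain ⟨w10, w11, w12, w13, hm1⟩ := exists_mergeLeft4 ([g7, g6, g5, g4] : List Int) rfl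
      have hs1 : swipeRow ([g7, g6, g5, g4] : List Int) = [w10, w11, w12, w13] :=
        (swipe_eq_merge _ rfl h1).trans hm1
      have hnb2 : ¬ badLine g8 g9 g10 g11 :=
        fun hb => hnd (row_badLine_D _ _ 2 (by norm_num) (by simp) (by norm_num) (by norm_num) hb)
      have h2 : hasAdjNegOnes (([g11, g10, g9, g8] : List Int).filter (fun x => x ≠ 0)) = false := by
        simpa using mt (fun hb => (badLine_symm _ _ _ _).mp ((badLine_iff _ _ _ _).mp hb)) hnb2
      obtain ⟨w20, w21, w22, w23, hm2⟩ := exists_mergeLeft4 ([g11, g10, g9, g8] : List Int) rfl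
      have hs2 : swipeRow ([g11, g10, g9, g8] : List Int) = [w20, w21, w22, w23] :=
        (swipe_eq_merge _ rfl h2).trans hm2
      have hnb3 : ¬ badLine g12 g13 g14 g15 :=
        fun hb => hnd (row_badLine_D _ _ 3 (by norm_num) (by simp) (by norm_num) (by norm_num) hb)
      have h3 : hasAdjNegOnes (([g15, g14, g13, g12] : List Int).filter (fun x => x ≠ 0)) = false := by
        simpa using mt (fun hb => (badLine_symm _ _ _ _).mp ((badLine_iff _ _ _ _).mp hb)) hnb3
      obtain ⟨w30, w31, w32, w33, hm3⟩ := exists_mergeLeft4 ([g15, g14, g13, g12] : List Int) rfl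
      have hs3 : swipeRow ([g15, g14, g13, g12] : List Int) = [w30, w31, w32, w33] :=
        (swipe_eq_merge _ rfl h3).trans hm3
      simp only [getNextGrid, getNextGrid_alt, fetchA_eq, pyGet_getD_nat, hr4, transpose4, rev4, List.map_cons,
        List.map_nil, List.foldl_cons, List.foldl_nil, List.getD]
      norm_num
      rw [hs0, hs1, hs2, hs3, hm0, hm1, hm2, hm3]
      rfl
  · push Not at hm
    obtain ⟨h1, h2, h3, h4⟩ := hm
    simp [getNextGrid, getNextGrid_alt, h1, h2, h3, h4]

theorem getNextGrid_changed : Claim_changed_getNextGrid := by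
  unfold Claim_changed_getNextGrid; decide

set_option maxHeartbeats 2000000 in
theorem getNextGrid_tight : Claim_exact_getNextGrid := by
  intro grid move _hdom _hpre hd
  have hr4 : List.range 4 = [0, 1, 2, 3] := rfl
  obtain ⟨hmv, hlen, hD⟩ := hd
  rcases grid with _ | ⟨g0, grid⟩; · simp at hlen
  rcases grid with _ | ⟨g1, grid⟩; · simp at hlen
  rcases grid with _ | ⟨g2, grid⟩; · simp at hlen
  rcases grid with _ | ⟨g3, grid⟩; · simp at hlen
  rcases grid with _ | ⟨g4, grid⟩; · simp at hlen
  rcases grid with _ | ⟨g5, grid⟩; · simp at hlen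
  rcases grid with _ | ⟨g6, grid⟩; · simp at hlen
  rcases grid with _ | ⟨g7, grid⟩; · simp at hlen
  rcases grid with _ | ⟨g8, grid⟩; · simp at hlen
  rcases grid with _ | ⟨g9, grid⟩; · simp at hlen
  rcases grid with _ | ⟨g10, grid⟩; · simp at hlen
  rcases grid with _ | ⟨g11, grid⟩; · simp at hlen
  rcases grid with _ | ⟨g12, grid⟩; · simp at hlen
  rcases grid with _ | ⟨g13, grid⟩; · simp at hlen
  rcases grid with _ | ⟨g14, grid⟩; · simp at hlen
  rcases grid with _ | ⟨g15, grid⟩; · simp at hlen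
  obtain ⟨k, hk, l, hl, hkl, hsame, h1, h2, hz⟩ := hD
  rcases hmv with hm | hm | hm | hm <;> subst hm
  · -- move = 100
    obtain ⟨a00, a01, a02, a03, hsw0⟩ := list_len4 (swipeRow ([g0, g4, g8, g12] : List Int)) (swipeRow_length _ rfl)
    obtain ⟨b00, b01, b02, b03, hml0⟩ := exists_mergeLeft4 ([g0, g4, g8, g12] : List Int) rfl
    obtain ⟨a10, a11, a12, a13, hsw1⟩ := list_len4 (swipeRow ([g1, g5, g9, g13] : List Int)) (swipeRow_length _ rfl)
    obtain ⟨b10, b11, b12, b13, hml1⟩ := exists_mergeLeft4 ([g1, g5, g9, g13] : List Int) rfl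
    obtain ⟨a20, a21, a22, a23, hsw2⟩ := list_len4 (swipeRow ([g2, g6, g10, g14] : List Int)) (swipeRow_length _ rfl)
    obtain ⟨b20, b21, b22, b23, hml2⟩ := exists_mergeLeft4 ([g2, g6, g10, g14] : List Int) rfl
    obtain ⟨a30, a31, a32, a33, hsw3⟩ := list_len4 (swipeRow ([g3, g7, g11, g15] : List Int)) (swipeRow_length _ rfl)
    obtain ⟨b30, b31, b32, b33, hml3⟩ := exists_mergeLeft4 ([g3, g7, g11, g15] : List Int) rfl
    have cA : getNextGrid (g0::g1::g2::g3::g4::g5::g6::g7::g8::g9::g10::g11::g12::g13::g14::g15::grid) 100 = [a00, a10, a20, a30, a01, a11, a21, a31, a02, a12, a22, a32, a03, a13, a23, a33] := by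
      simp only [getNextGrid, getNextGrid_alt, fetchA_eq, pyGet_getD_nat, hr4, transpose4, rev4,
        List.map_cons, List.map_nil, List.foldl_cons, List.foldl_nil, List.getD]
      norm_num
      rw [hsw0, hsw1, hsw2, hsw3]
      simp [List.getD]
    have cB : getNextGrid_alt (g0::g1::g2::g3::g4::g5::g6::g7::g8::g9::g10::g11::g12::g13::g14::g15::grid) 100 = [b00, b10, b20, b30, b01, b11, b21, b31, b02, b12, b22, b32, b03, b13, b23, b33] := by
      simp only [getNextGrid, getNextGrid_alt, fetchA_eq, pyGet_getD_nat, hr4, transpose4, rev4,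
        List.map_cons, List.map_nil, List.foldl_cons, List.foldl_nil, List.getD]
      norm_num
      rw [hml0, hml1, hml2, hml3]
      simp [List.getD]
    have hm4 : k % 4 = l % 4 := by simpa [sameLine] using hsame
    have hz' : ∀ m, m < l → k < m → k % 4 = m % 4 → ((g0::g1::g2::g3::g4::g5::g6::g7::g8::g9::g10::g11::g12::g13::g14::g15::grid) : List Int).getD m 0 = 0 :=
      fun m u v w => hz m u v (by simpa [sameLine] using w)
    obtain ⟨i, hi4, hbad⟩ := col_D_badLine _ k l hl hkl hm4 h1 h2 hz'
    intro heq
    rw [cA, cB] at heq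
    simp only [List.cons.injEq, and_true] at heq
    obtain ⟨e0, e1, e2, e3, e4, e5, e6, e7, e8, e9, e10, e11, e12, e13, e14, e15⟩ := heq
    interval_cases i
    · have hbad' : badLine g0 g4 g8 g12 := hbad
      have hadj : hasAdjNegOnes (([g0, g4, g8, g12] : List Int).filter (fun x => x ≠ 0)) = true :=
        (badLine_iff _ _ _ _).mpr hbad'
      exact swipe_ne_merge ([g0, g4, g8, g12] : List Int) rfl hadj (by
        rw [hsw0, hml0]
        simp only [List.cons.injEq, and_true]
        exact ⟨e0, e4, e8, e12⟩)
    · have hbad' : badLine g1 g5 g9 g13 := hbad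
      have hadj : hasAdjNegOnes (([g1, g5, g9, g13] : List Int).filter (fun x => x ≠ 0)) = true :=
        (badLine_iff _ _ _ _).mpr hbad'
      exact swipe_ne_merge ([g1, g5, g9, g13] : List Int) rfl hadj (by
        rw [hsw1, hml1]
        simp only [List.cons.injEq, and_true]
        exact ⟨e1, e5, e9, e13⟩)
    · have hbad' : badLine g2 g6 g10 g14 := hbad
      have hadj : hasAdjNegOnes (([g2, g6, g10, g14] : List Int).filter (fun x => x ≠ 0)) = true :=
        (badLine_iff _ _ _ _).mpr hbad'
      exact swipe_ne_merge ([g2, g6, g10, g14] : List Int) rfl hadj (by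
        rw [hsw2, hml2]
        simp only [List.cons.injEq, and_true]
        exact ⟨e2, e6, e10, e14⟩)
    · have hbad' : badLine g3 g7 g11 g15 := hbad
      have hadj : hasAdjNegOnes (([g3, g7, g11, g15] : List Int).filter (fun x => x ≠ 0)) = true :=
        (badLine_iff _ _ _ _).mpr hbad'
      exact swipe_ne_merge ([g3, g7, g11, g15] : List Int) rfl hadj (by
        rw [hsw3, hml3]
        simp only [List.cons.injEq, and_true]
        exact ⟨e3, e7, e11, e15⟩)
  · -- move = 101
    obtain ⟨a00, a01, a02, a03, hsw0⟩ := list_len4 (swipeRow ([g0, g1, g2, g3] : List Int)) (swipeRow_length _ rfl)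
    obtain ⟨b00, b01, b02, b03, hml0⟩ := exists_mergeLeft4 ([g0, g1, g2, g3] : List Int) rfl
    obtain ⟨a10, a11, a12, a13, hsw1⟩ := list_len4 (swipeRow ([g4, g5, g6, g7] : List Int)) (swipeRow_length _ rfl)
    obtain ⟨b10, b11, b12, b13, hml1⟩ := exists_mergeLeft4 ([g4, g5, g6, g7] : List Int) rfl
    obtain ⟨a20, a21, a22, a23, hsw2⟩ := list_len4 (swipeRow ([g8, g9, g10, g11] : List Int)) (swipeRow_length _ rfl)
    obtain ⟨b20, b21, b22, b23, hml2⟩ := exists_mergeLeft4 ([g8, g9, g10, g11] : List Int) rfl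
    obtain ⟨a30, a31, a32, a33, hsw3⟩ := list_len4 (swipeRow ([g12, g13, g14, g15] : List Int)) (swipeRow_length _ rfl)
    obtain ⟨b30, b31, b32, b33, hml3⟩ := exists_mergeLeft4 ([g12, g13, g14, g15] : List Int) rfl
    have cA : getNextGrid (g0::g1::g2::g3::g4::g5::g6::g7::g8::g9::g10::g11::g12::g13::g14::g15::grid) 101 = [a00, a01, a02, a03, a10, a11, a12, a13, a20, a21, a22, a23, a30, a31, a32, a33] := by
      simp only [getNextGrid, getNextGrid_alt, fetchA_eq, pyGet_getD_nat, hr4, transpose4, rev4,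
        List.map_cons, List.map_nil, List.foldl_cons, List.foldl_nil, List.getD]
      norm_num
      rw [hsw0, hsw1, hsw2, hsw3]
      simp [List.getD]
    have cB : getNextGrid_alt (g0::g1::g2::g3::g4::g5::g6::g7::g8::g9::g10::g11::g12::g13::g14::g15::grid) 101 = [b00, b01, b02, b03, b10, b11, b12, b13, b20, b21, b22, b23, b30, b31, b32, b33] := by
      simp only [getNextGrid, getNextGrid_alt, fetchA_eq, pyGet_getD_nat, hr4, transpose4, rev4,
        List.map_cons, List.map_nil, List.foldl_cons, List.foldl_nil, List.getD]
      norm_num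
      rw [hml0, hml1, hml2, hml3]
      simp [List.getD]
    have hm4 : k / 4 = l / 4 := by simpa [sameLine] using hsame
    have hz' : ∀ m, m < l → k < m → k / 4 = m / 4 → ((g0::g1::g2::g3::g4::g5::g6::g7::g8::g9::g10::g11::g12::g13::g14::g15::grid) : List Int).getD m 0 = 0 :=
      fun m u v w => hz m u v (by simpa [sameLine] using w)
    obtain ⟨i, hi4, hbad⟩ := row_D_badLine _ k l hl hkl hm4 h1 h2 hz'
    intro heq
    rw [cA, cB] at heq
    simp only [List.cons.injEq, and_true] at heq
    obtain ⟨e0, e1, e2, e3, e4, e5, e6, e7, e8, e9, e10, e11, e12, e13, e14, e15⟩ := heq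
    interval_cases i
    · have hbad' : badLine g0 g1 g2 g3 := hbad
      have hadj : hasAdjNegOnes (([g0, g1, g2, g3] : List Int).filter (fun x => x ≠ 0)) = true :=
        (badLine_iff _ _ _ _).mpr hbad'
      exact swipe_ne_merge ([g0, g1, g2, g3] : List Int) rfl hadj (by
        rw [hsw0, hml0]
        simp only [List.cons.injEq, and_true]
        exact ⟨e0, e1, e2, e3⟩)
    · have hbad' : badLine g4 g5 g6 g7 := hbad
      have hadj : hasAdjNegOnes (([g4, g5, g6, g7] : List Int).filter (fun x => x ≠ 0)) = true :=
        (badLine_iff _ _ _ _).mpr hbad'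
      exact swipe_ne_merge ([g4, g5, g6, g7] : List Int) rfl hadj (by
        rw [hsw1, hml1]
        simp only [List.cons.injEq, and_true]
        exact ⟨e4, e5, e6, e7⟩)
    · have hbad' : badLine g8 g9 g10 g11 := hbad
      have hadj : hasAdjNegOnes (([g8, g9, g10, g11] : List Int).filter (fun x => x ≠ 0)) = true :=
        (badLine_iff _ _ _ _).mpr hbad'
      exact swipe_ne_merge ([g8, g9, g10, g11] : List Int) rfl hadj (by
        rw [hsw2, hml2]
        simp only [List.cons.injEq, and_true]
        exact ⟨e8, e9, e10, e11⟩)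
    · have hbad' : badLine g12 g13 g14 g15 := hbad
      have hadj : hasAdjNegOnes (([g12, g13, g14, g15] : List Int).filter (fun x => x ≠ 0)) = true :=
        (badLine_iff _ _ _ _).mpr hbad'
      exact swipe_ne_merge ([g12, g13, g14, g15] : List Int) rfl hadj (by
        rw [hsw3, hml3]
        simp only [List.cons.injEq, and_true]
        exact ⟨e12, e13, e14, e15⟩)
  · -- move = 102
    obtain ⟨a00, a01, a02, a03, hsw0⟩ := list_len4 (swipeRow ([g12, g8, g4, g0] : List Int)) (swipeRow_length _ rfl)
    obtain ⟨b00, b01, b02, b03, hml0⟩ := exists_mergeLeft4 ([g12, g8, g4, g0] : List Int) rfl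
    obtain ⟨a10, a11, a12, a13, hsw1⟩ := list_len4 (swipeRow ([g13, g9, g5, g1] : List Int)) (swipeRow_length _ rfl)
    obtain ⟨b10, b11, b12, b13, hml1⟩ := exists_mergeLeft4 ([g13, g9, g5, g1] : List Int) rfl
    obtain ⟨a20, a21, a22, a23, hsw2⟩ := list_len4 (swipeRow ([g14, g10, g6, g2] : List Int)) (swipeRow_length _ rfl)
    obtain ⟨b20, b21, b22, b23, hml2⟩ := exists_mergeLeft4 ([g14, g10, g6, g2] : List Int) rfl
    obtain ⟨a30, a31, a32, a33, hsw3⟩ := list_len4 (swipeRow ([g15, g11, g7, g3] : List Int)) (swipeRow_length _ rfl)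
    obtain ⟨b30, b31, b32, b33, hml3⟩ := exists_mergeLeft4 ([g15, g11, g7, g3] : List Int) rfl
    have cA : getNextGrid (g0::g1::g2::g3::g4::g5::g6::g7::g8::g9::g10::g11::g12::g13::g14::g15::grid) 102 = [a03, a13, a23, a33, a02, a12, a22, a32, a01, a11, a21, a31, a00, a10, a20, a30] := by
      simp only [getNextGrid, getNextGrid_alt, fetchA_eq, pyGet_getD_nat, hr4, transpose4, rev4,
        List.map_cons, List.map_nil, List.foldl_cons, List.foldl_nil, List.getD]
      norm_num
      rw [hsw0, hsw1, hsw2, hsw3]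
      simp [List.getD]
    have cB : getNextGrid_alt (g0::g1::g2::g3::g4::g5::g6::g7::g8::g9::g10::g11::g12::g13::g14::g15::grid) 102 = [b03, b13, b23, b33, b02, b12, b22, b32, b01, b11, b21, b31, b00, b10, b20, b30] := by
      simp only [getNextGrid, getNextGrid_alt, fetchA_eq, pyGet_getD_nat, hr4, transpose4, rev4,
        List.map_cons, List.map_nil, List.foldl_cons, List.foldl_nil, List.getD]
      norm_num
      rw [hml0, hml1, hml2, hml3]
      simp [List.getD]
    have hm4 : k % 4 = l % 4 := by simpa [sameLine] using hsame
    have hz' : ∀ m, m < l → k < m → k % 4 = m % 4 → ((g0::g1::g2::g3::g4::g5::g6::g7::g8::g9::g10::g11::g12::g13::g14::g15::grid) : List Int).getD m 0 = 0 :=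
      fun m u v w => hz m u v (by simpa [sameLine] using w)
    obtain ⟨i, hi4, hbad⟩ := col_D_badLine _ k l hl hkl hm4 h1 h2 hz'
    intro heq
    rw [cA, cB] at heq
    simp only [List.cons.injEq, and_true] at heq
    obtain ⟨e0, e1, e2, e3, e4, e5, e6, e7, e8, e9, e10, e11, e12, e13, e14, e15⟩ := heq
    interval_cases i
    · have hbad' : badLine g0 g4 g8 g12 := hbad
      have hadj : hasAdjNegOnes (([g12, g8, g4, g0] : List Int).filter (fun x => x ≠ 0)) = true :=
        (badLine_iff _ _ _ _).mpr ((badLine_symm _ _ _ _).mp hbad')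
      exact swipe_ne_merge ([g12, g8, g4, g0] : List Int) rfl hadj (by
        rw [hsw0, hml0]
        simp only [List.cons.injEq, and_true]
        exact ⟨e12, e8, e4, e0⟩)
    · have hbad' : badLine g1 g5 g9 g13 := hbad
      have hadj : hasAdjNegOnes (([g13, g9, g5, g1] : List Int).filter (fun x => x ≠ 0)) = true :=
        (badLine_iff _ _ _ _).mpr ((badLine_symm _ _ _ _).mp hbad')
      exact swipe_ne_merge ([g13, g9, g5, g1] : List Int) rfl hadj (by
        rw [hsw1, hml1]
        simp only [List.cons.injEq, and_true]
        exact ⟨e13, e9, e5, e1⟩)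
    · have hbad' : badLine g2 g6 g10 g14 := hbad
      have hadj : hasAdjNegOnes (([g14, g10, g6, g2] : List Int).filter (fun x => x ≠ 0)) = true :=
        (badLine_iff _ _ _ _).mpr ((badLine_symm _ _ _ _).mp hbad')
      exact swipe_ne_merge ([g14, g10, g6, g2] : List Int) rfl hadj (by
        rw [hsw2, hml2]
        simp only [List.cons.injEq, and_true]
        exact ⟨e14, e10, e6, e2⟩)
    · have hbad' : badLine g3 g7 g11 g15 := hbad
      have hadj : hasAdjNegOnes (([g15, g11, g7, g3] : List Int).filter (fun x => x ≠ 0)) = true :=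
        (badLine_iff _ _ _ _).mpr ((badLine_symm _ _ _ _).mp hbad')
      exact swipe_ne_merge ([g15, g11, g7, g3] : List Int) rfl hadj (by
        rw [hsw3, hml3]
        simp only [List.cons.injEq, and_true]
        exact ⟨e15, e11, e7, e3⟩)
  · -- move = 103
    obtain ⟨a00, a01, a02, a03, hsw0⟩ := list_len4 (swipeRow ([g3, g2, g1, g0] : List Int)) (swipeRow_length _ rfl)
    obtain ⟨b00, b01, b02, b03, hml0⟩ := exists_mergeLeft4 ([g3, g2, g1, g0] : List Int) rfl
    obtain ⟨a10, a11, a12, a13, hsw1⟩ := list_len4 (swipeRow ([g7, g6, g5, g4] : List Int)) (swipeRow_length _ rfl)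
    obtain ⟨b10, b11, b12, b13, hml1⟩ := exists_mergeLeft4 ([g7, g6, g5, g4] : List Int) rfl
    obtain ⟨a20, a21, a22, a23, hsw2⟩ := list_len4 (swipeRow ([g11, g10, g9, g8] : List Int)) (swipeRow_length _ rfl)
    obtain ⟨b20, b21, b22, b23, hml2⟩ := exists_mergeLeft4 ([g11, g10, g9, g8] : List Int) rfl
    obtain ⟨a30, a31, a32, a33, hsw3⟩ := list_len4 (swipeRow ([g15, g14, g13, g12] : List Int)) (swipeRow_length _ rfl)
    obtain ⟨b30, b31, b32, b33, hml3⟩ := exists_mergeLeft4 ([g15, g14, g13, g12] : List Int) rfl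
    have cA : getNextGrid (g0::g1::g2::g3::g4::g5::g6::g7::g8::g9::g10::g11::g12::g13::g14::g15::grid) 103 = [a03, a02, a01, a00, a13, a12, a11, a10, a23, a22, a21, a20, a33, a32, a31, a30] := by
      simp only [getNextGrid, getNextGrid_alt, fetchA_eq, pyGet_getD_nat, hr4, transpose4, rev4,
        List.map_cons, List.map_nil, List.foldl_cons, List.foldl_nil, List.getD]
      norm_num
      rw [hsw0, hsw1, hsw2, hsw3]
      simp [List.getD]
    have cB : getNextGrid_alt (g0::g1::g2::g3::g4::g5::g6::g7::g8::g9::g10::g11::g12::g13::g14::g15::grid) 103 = [b03, b02, b01, b00, b13, b12, b11, b10, b23, b22, b21, b20, b33, b32, b31, b30] := by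
      simp only [getNextGrid, getNextGrid_alt, fetchA_eq, pyGet_getD_nat, hr4, transpose4, rev4,
        List.map_cons, List.map_nil, List.foldl_cons, List.foldl_nil, List.getD]
      norm_num
      rw [hml0, hml1, hml2, hml3]
      simp [List.getD]
    have hm4 : k / 4 = l / 4 := by simpa [sameLine] using hsame
    have hz' : ∀ m, m < l → k < m → k / 4 = m / 4 → ((g0::g1::g2::g3::g4::g5::g6::g7::g8::g9::g10::g11::g12::g13::g14::g15::grid) : List Int).getD m 0 = 0 :=
      fun m u v w => hz m u v (by simpa [sameLine] using w)
    obtain ⟨i, hi4, hbad⟩ := row_D_badLine _ k l hl hkl hm4 h1 h2 hz'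
    intro heq
    rw [cA, cB] at heq
    simp only [List.cons.injEq, and_true] at heq
    obtain ⟨e0, e1, e2, e3, e4, e5, e6, e7, e8, e9, e10, e11, e12, e13, e14, e15⟩ := heq
    interval_cases i
    · have hbad' : badLine g0 g1 g2 g3 := hbad
      have hadj : hasAdjNegOnes (([g3, g2, g1, g0] : List Int).filter (fun x => x ≠ 0)) = true :=
        (badLine_iff _ _ _ _).mpr ((badLine_symm _ _ _ _).mp hbad')
      exact swipe_ne_merge ([g3, g2, g1, g0] : List Int) rfl hadj (by
        rw [hsw0, hml0]
        simp only [List.cons.injEq, and_true]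
        exact ⟨e3, e2, e1, e0⟩)
    · have hbad' : badLine g4 g5 g6 g7 := hbad
      have hadj : hasAdjNegOnes (([g7, g6, g5, g4] : List Int).filter (fun x => x ≠ 0)) = true :=
        (badLine_iff _ _ _ _).mpr ((badLine_symm _ _ _ _).mp hbad')
      exact swipe_ne_merge ([g7, g6, g5, g4] : List Int) rfl hadj (by
        rw [hsw1, hml1]
        simp only [List.cons.injEq, and_true]
        exact ⟨e7, e6, e5, e4⟩)
    · have hbad' : badLine g8 g9 g10 g11 := hbad
      have hadj : hasAdjNegOnes (([g11, g10, g9, g8] : List Int).filter (fun x => x ≠ 0)) = true :=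
        (badLine_iff _ _ _ _).mpr ((badLine_symm _ _ _ _).mp hbad')
      exact swipe_ne_merge ([g11, g10, g9, g8] : List Int) rfl hadj (by
        rw [hsw2, hml2]
        simp only [List.cons.injEq, and_true]
        exact ⟨e11, e10, e9, e8⟩)
    · have hbad' : badLine g12 g13 g14 g15 := hbad
      have hadj : hasAdjNegOnes (([g15, g14, g13, g12] : List Int).filter (fun x => x ≠ 0)) = true :=
        (badLine_iff _ _ _ _).mpr ((badLine_symm _ _ _ _).mp hbad')
      exact swipe_ne_merge ([g15, g14, g13, g12] : List Int) rfl hadj (by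
        rw [hsw3, hml3]
        simp only [List.cons.injEq, and_true]
        exact ⟨e15, e14, e13, e12⟩)
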